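-- pv_equiv track=rewrite | github.com/tymisiorek/connecteddatahub | cleaning/production/pipeline/boards.py | split_into_contiguous_runs
-- ===== SOURCE A (Python) =====
-- def split_into_contiguous_runs(indices):
--     #boards are reported in one block, so if there are gaps, there is an issue
--     if not indices:
--         return []
--     sorted_idx = sorted(indices)
--     runs = [[sorted_idx[0]]]
--     for x in sorted_idx[1:]:
--         if x == runs[-1][-1] + 1:
--             runs[-1].append(x)
--         else:
--             runs.append([x])
--     return runs
-- ===== SOURCE B (Python) =====
-- def split_into_contiguous_runs(indices):
--     # staged passes: sort; collect cut positions where the successor test fails;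
--     # then slice the sorted list between consecutive cuts
--     s = sorted(indices)
--     if not s:
--         return []
--     n = len(s)
--     cuts = [0] + [i for i in range(1, n) if s[i] != s[i - 1] + 1] + [n]
--     return [s[a:b] for a, b in zip(cuts, cuts[1:])]
-- ===== Notes on version B (the rewrite author's own statement) =====
-- stated objective: alternative
-- what changed: B replaces A's single stateful scan that mutates a growing list-of-runs by two staged passes over the sorted list: first compute the cut positions where sorted[i] != sorted[i-1]+1, then slice the sorted list between consecutive cut positions.
import Mathlib
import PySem

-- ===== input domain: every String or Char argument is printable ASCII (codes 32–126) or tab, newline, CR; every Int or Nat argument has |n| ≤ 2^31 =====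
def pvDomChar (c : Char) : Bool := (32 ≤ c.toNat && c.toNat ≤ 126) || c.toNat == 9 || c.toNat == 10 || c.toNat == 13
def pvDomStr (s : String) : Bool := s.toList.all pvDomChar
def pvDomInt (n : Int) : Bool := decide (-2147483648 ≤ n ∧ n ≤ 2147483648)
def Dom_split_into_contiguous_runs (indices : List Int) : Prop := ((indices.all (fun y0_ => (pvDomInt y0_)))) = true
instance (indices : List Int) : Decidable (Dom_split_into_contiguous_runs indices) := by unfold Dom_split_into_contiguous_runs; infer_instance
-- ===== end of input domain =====

-- B replaces A's single stateful run-building scan by two staged passes: find cut positions, then slice between them.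

-- ===== PORT A =====
-- one loop step of A: x == runs[-1][-1] + 1 ? runs[-1].append(x) : runs.append([x])
-- (runs is never empty and its runs are never empty, so getLastD defaults are never read)
def stepA (runs : List (List Int)) (x : Int) : List (List Int) :=
  if x = (runs.getLastD []).getLastD 0 + 1 then
    runs.dropLast ++ [(runs.getLastD []) ++ [x]]
  else
    runs ++ [[x]]

def split_into_contiguous_runs (indices : List Int) : List (List Int) :=
  if indices = [] then []
  else
    match PySem.List.sorted indices (fun x => x) false with
    | [] => []   -- unreachable: sorted of a non-empty list is non-empty
    | h :: t => t.foldl stepA [[h]]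

-- ===== PORT B =====
-- s = sorted(indices); cuts = [0] + [i in range(1,n) if s[i] != s[i-1]+1] + [n];
-- return [s[a:b] for a,b in zip(cuts, cuts[1:])]   (s[i] via pyGetD: i is always in range)
def split_into_contiguous_runs_alt (indices : List Int) : List (List Int) :=
  let s := PySem.List.sorted indices (fun x => x) false
  if s = [] then []
  else
    let n : Int := s.length
    let cuts : List Int := 0 :: ((PySem.List.pyRange 1 n 1).filter
        (fun i => !(PySem.List.pyGetD s i 0 == PySem.List.pyGetD s (i-1) 0 + 1))) ++ [n]
    (cuts.zip cuts.tail).map (fun ab => PySem.List.slice s (some ab.1) (some ab.2))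

-- ===== PRECONDITION & SPEC =====
def Spec_split_into_contiguous_runs (indices : List Int) (out : List (List Int)) : Prop := out = split_into_contiguous_runs_alt indices
instance (indices : List Int) (out : List (List Int)) : Decidable (Spec_split_into_contiguous_runs indices out) := by unfold Spec_split_into_contiguous_runs; infer_instance

-- ===== CLAIM (what is proved, stated in full; the proofs are below) =====
def Claim_equal_split_into_contiguous_runs : Prop := ∀ (indices : List Int), Dom_split_into_contiguous_runs indices → Spec_split_into_contiguous_runs indices (split_into_contiguous_runs indices)

-- ===== LEMMAS AND PROOFS =====

-- forward recursion equivalent to A's fold: current run c (non-empty), rest of the list t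
def fw (c : List Int) (t : List Int) : List (List Int) :=
  match t with
  | [] => [c]
  | x :: xs => if x = c.getLastD 0 + 1 then fw (c ++ [x]) xs else c :: fw [x] xs

-- prepend a prefix onto the first run
def attach (p : List Int) (rs : List (List Int)) : List (List Int) :=
  match rs with
  | [] => [p]
  | r :: rest => (p ++ r) :: rest

-- reference chunking recursion both ports are reduced to
def chunksR : List Int → List (List Int)
  | [] => []
  | [x] => [[x]]
  | x :: y :: t => if y = x + 1 then attach [x] (chunksR (y :: t)) else [x] :: chunksR (y :: t)

-- Nat-indexed model of B's staged computation
def cutP (s : List Int) (i : Nat) : Bool := !(s.getD i 0 == s.getD (i - 1) 0 + 1)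

def natCuts (s : List Int) : List Nat :=
  ((List.range (s.length - 1)).map (fun k => k + 1)).filter (cutP s)

def chunkOf (t : List Int) (ab : Nat × Nat) : List Int := (t.drop ab.1).take (ab.2 - ab.1)

def chunksN (s : List Int) : List (List Int) :=
  ((0 :: (natCuts s ++ [s.length])).zip (natCuts s ++ [s.length])).map (chunkOf s)

theorem getLastD_concat' {α : Type} (l : List α) (a d : α) : (l ++ [a]).getLastD d = a := by simp

theorem getLastD_append' (p d : List Int) (h : d ≠ []) :
    (p ++ d).getLastD 0 = d.getLastD 0 := by
  rcases d.eq_nil_or_concat with rfl | ⟨l, a, rfl⟩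
  · exact absurd rfl h
  · simp only [List.concat_eq_append, ← List.append_assoc, getLastD_concat']

theorem foldlA_fw (t : List Int) : ∀ (acc : List (List Int)) (c : List Int), c ≠ [] →
    t.foldl stepA (acc ++ [c]) = acc ++ fw c t := by
  induction t with
  | nil => intro acc c _; simp [fw]
  | cons x xs ih =>
    intro acc c hc
    by_cases hx : x = c.getLastD 0 + 1
    · have hstep : stepA (acc ++ [c]) x = acc ++ [c ++ [x]] := by
        unfold stepA
        rw [getLastD_concat', List.dropLast_concat, if_pos hx]
      have hfw : fw c (x :: xs) = fw (c ++ [x]) xs := by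
        simp only [fw]; rw [if_pos hx]
      simp only [List.foldl_cons, hstep, hfw]
      exact ih acc (c ++ [x]) (by simp)
    · have hstep : stepA (acc ++ [c]) x = (acc ++ [c]) ++ [[x]] := by
        unfold stepA
        rw [getLastD_concat', if_neg hx]
      have hfw : fw c (x :: xs) = c :: fw [x] xs := by
        simp only [fw]; rw [if_neg hx]
      simp only [List.foldl_cons, hstep, hfw]
      rw [ih (acc ++ [c]) [x] (by simp)]
      simp

theorem fw_attach (ts : List Int) : ∀ (p d : List Int), d ≠ [] →
    fw (p ++ d) ts = attach p (fw d ts) := by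
  induction ts with
  | nil => intro p d _; simp [fw, attach]
  | cons z zs ih =>
    intro p d hd
    have hg : (p ++ d).getLastD 0 = d.getLastD 0 := getLastD_append' p d hd
    by_cases hz : z = d.getLastD 0 + 1
    · have h1 : fw (p ++ d) (z :: zs) = fw (p ++ (d ++ [z])) zs := by
        simp only [fw, hg]; rw [if_pos hz, List.append_assoc]
      have h2 : fw d (z :: zs) = fw (d ++ [z]) zs := by
        simp only [fw]; rw [if_pos hz]
      rw [h1, h2, ih p (d ++ [z]) (by simp)]
    · have h1 : fw (p ++ d) (z :: zs) = (p ++ d) :: fw [z] zs := by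
        simp only [fw, hg]; rw [if_neg hz]
      have h2 : fw d (z :: zs) = d :: fw [z] zs := by
        simp only [fw]; rw [if_neg hz]
      rw [h1, h2]; simp [attach]

theorem fw_chunksR (t : List Int) : ∀ (h : Int), fw [h] t = chunksR (h :: t) := by
  induction t with
  | nil => intro h; simp [fw, chunksR]
  | cons y t' ih =>
    intro h
    by_cases hy : y = h + 1
    · have h1 : fw [h] (y :: t') = fw ([h] ++ [y]) t' := by
        simp only [fw]; rw [if_pos (by simpa using hy)]
      rw [h1, fw_attach t' [h] [y] (by simp), ih y]
      simp [chunksR, hy]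
    · have h1 : fw [h] (y :: t') = [h] :: fw [y] t' := by
        simp only [fw]; rw [if_neg (by simpa using hy)]
      rw [h1, ih y]
      simp [chunksR, hy]

-- natCuts of a list with two or more elements, structurally
theorem natCuts_cons (x y : Int) (s' : List Int) :
    natCuts (x :: y :: s') =
      (if y = x + 1 then [] else [1]) ++ (natCuts (y :: s')).map (fun i => i + 1) := by
  have hcong : ∀ a ∈ (List.range s'.length).map (fun k => k + 1),
      (cutP (x :: y :: s') ∘ fun k => k + 1) a = cutP (y :: s') a := by
    intro a ha
    obtain ⟨k, _, rfl⟩ := List.mem_map.mp ha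
    simp [cutP, Function.comp]
  have htail : (((List.range s'.length).map (fun k => k + 1)).map (fun k => k + 1)).filter (cutP (x :: y :: s'))
      = (((List.range s'.length).map (fun k => k + 1)).filter (cutP (y :: s'))).map (fun k => k + 1) := by
    rw [List.filter_map, List.filter_congr hcong]
  show (((List.range (s'.length + 1)).map (fun k => k + 1)).filter (cutP (x :: y :: s')))
      = (if y = x + 1 then [] else [1]) ++ (((List.range s'.length).map (fun k => k + 1)).filter (cutP (y :: s'))).map (fun k => k + 1)
  rw [List.range_succ_eq_map]
  rw [show List.map Nat.succ (List.range s'.length) = (List.range s'.length).map (fun k => k + 1) from by simp]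
  rw [List.map_cons]
  by_cases hy : y = x + 1
  · rw [List.filter_cons_of_neg (by simp [cutP, hy]), htail, if_pos hy, List.nil_append]
  · rw [List.filter_cons_of_pos (by simp [cutP, hy]), htail, if_neg hy]
    rfl


-- shifted zip of cuts slices the tail
theorem zip_shift (ds : List Nat) (x : Int) (t : List Int) :
    (((ds.map (fun i => i + 1)).zip (ds.map (fun i => i + 1)).tail).map (chunkOf (x :: t)))
      = (ds.zip ds.tail).map (chunkOf t) := by
  induction ds with
  | nil => simp
  | cons d1 r ih =>
    cases r with
    | nil => simp
    | cons d2 r' =>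
      simp only [List.map_cons, List.tail_cons, List.zip_cons_cons, List.map_cons] at ih ⊢
      rw [ih]
      congr 1
      simp [chunkOf]

theorem chunksN_chunksR : ∀ (t : List Int) (h : Int), chunksN (h :: t) = chunksR (h :: t) := by
  intro t
  induction t with
  | nil => intro h; rfl
  | cons y t' ih =>
    intro h
    obtain ⟨c, r, hl⟩ : ∃ c r, natCuts (y :: t') ++ [(y :: t').length] = c :: r := by
      cases natCuts (y :: t') with
      | nil => exact ⟨_, _, rfl⟩
      | cons a b => exact ⟨_, _, rfl⟩
    by_cases hy : y = h + 1
    · have hcuts : natCuts (h :: y :: t') = (natCuts (y :: t')).map (fun i => i + 1) := by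
        rw [natCuts_cons h y t', if_pos hy, List.nil_append]
      have hL2 : natCuts (h :: y :: t') ++ [(h :: y :: t').length]
          = (natCuts (y :: t') ++ [(y :: t').length]).map (fun i => i + 1) := by
        rw [hcuts]; simp
      have htl : (((c :: r).map (fun i => i + 1)).zip (((c :: r).map (fun i => i + 1)).tail)).map (chunkOf (h :: y :: t'))
          = ((c :: r).zip r).map (chunkOf (y :: t')) := by
        simpa using zip_shift (c :: r) h (y :: t')
      have hR : chunksR (h :: y :: t') = attach [h] (chunksR (y :: t')) := by
        simp [chunksR, hy]
      rw [hR, ← ih y]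
      unfold chunksN
      rw [hL2, hl, List.map_cons, List.zip_cons_cons, List.map_cons]
      rw [List.zip_cons_cons, List.map_cons]
      simp only [List.map_cons, List.tail_cons] at htl
      rw [htl]
      simp only [attach]
      congr 1
    · have hcuts : natCuts (h :: y :: t') = 1 :: (natCuts (y :: t')).map (fun i => i + 1) := by
        rw [natCuts_cons h y t', if_neg hy]; rfl
      have hL2 : natCuts (h :: y :: t') ++ [(h :: y :: t').length]
          = (0 :: (natCuts (y :: t') ++ [(y :: t').length])).map (fun i => i + 1) := by
        rw [hcuts]; simp
      have htl : (((0 :: c :: r).map (fun i => i + 1)).zip (((0 :: c :: r).map (fun i => i + 1)).tail)).map (chunkOf (h :: y :: t'))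
          = ((0 :: c :: r).zip (c :: r)).map (chunkOf (y :: t')) := by
        simpa using zip_shift (0 :: c :: r) h (y :: t')
      have hR : chunksR (h :: y :: t') = [h] :: chunksR (y :: t') := by
        simp [chunksR, hy]
      rw [hR, ← ih y]
      unfold chunksN
      rw [hL2, hl, List.map_cons, List.map_cons, List.zip_cons_cons, List.map_cons]
      rw [List.zip_cons_cons, List.map_cons]
      simp only [List.map_cons, List.tail_cons, List.zip_cons_cons] at htl
      rw [htl]
      congr 1


theorem sorted_ne_nil (indices : List Int) (h : indices ≠ []) :
    PySem.List.sorted indices (fun x => x) false ≠ [] := by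
  simpa [PySem.List.sorted_eq_nil_iff] using h

theorem portB_chunksN (s : List Int) :
    (let n : Int := s.length
     let cuts : List Int := 0 :: ((PySem.List.pyRange 1 n 1).filter
        (fun i => !(PySem.List.pyGetD s i 0 == PySem.List.pyGetD s (i-1) 0 + 1))) ++ [n]
     (cuts.zip cuts.tail).map (fun ab => PySem.List.slice s (some ab.1) (some ab.2)))
      = chunksN s := by
  have hfilt : (PySem.List.pyRange 1 (s.length : Int) 1).filter
        (fun i => !(PySem.List.pyGetD s i 0 == PySem.List.pyGetD s (i-1) 0 + 1))
      = (natCuts s).map (fun (i : Nat) => (i : Int)) := by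
    rw [PySem.List.pyRange_one]
    have hn : (((s.length : Int)) - 1).toNat = s.length - 1 := by omega
    rw [hn]
    have hm : (List.range (s.length - 1)).map (fun k => (1 : Int) + (k : Nat))
        = ((List.range (s.length - 1)).map (fun k => k + 1)).map (fun (i : Nat) => (i : Int)) := by
      rw [List.map_map]
      refine List.map_congr_left (fun k _ => ?_)
      show (1 : Int) + (k : Nat) = ((k + 1 : Nat) : Int)
      push_cast
      ring
    rw [hm, List.filter_map]
    unfold natCuts
    refine congrArg _ (List.filter_congr ?_)
    intro a ha
    obtain ⟨k, hk, rfl⟩ := List.mem_map.mp ha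
    show (!(PySem.List.pyGetD s ((k + 1 : Nat) : Int) 0 == PySem.List.pyGetD s (((k + 1 : Nat) : Int) - 1) 0 + 1)) = cutP s (k + 1)
    have h1 : ((k + 1 : Nat) : Int) - 1 = ((k : Nat) : Int) := by push_cast; ring
    rw [h1, PySem.List.pyGetD_natCast, PySem.List.pyGetD_natCast]
    simp [cutP]
  show ((((0 : Int) :: ((PySem.List.pyRange 1 (s.length : Int) 1).filter
        (fun i => !(PySem.List.pyGetD s i 0 == PySem.List.pyGetD s (i-1) 0 + 1)))) ++ [(s.length : Int)]).zip
        ((((0 : Int) :: ((PySem.List.pyRange 1 (s.length : Int) 1).filter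
        (fun i => !(PySem.List.pyGetD s i 0 == PySem.List.pyGetD s (i-1) 0 + 1)))) ++ [(s.length : Int)]).tail)).map
        (fun ab => PySem.List.slice s (some ab.1) (some ab.2)) = chunksN s
  have hcuts : (((0 : Int) :: ((PySem.List.pyRange 1 (s.length : Int) 1).filter
        (fun i => !(PySem.List.pyGetD s i 0 == PySem.List.pyGetD s (i-1) 0 + 1)))) ++ [(s.length : Int)])
      = (0 :: (natCuts s ++ [s.length])).map (fun (i : Nat) => (i : Int)) := by
    rw [hfilt]; simp
  rw [hcuts]
  have htail : ((0 :: (natCuts s ++ [s.length])).map (fun (i : Nat) => (i : Int))).tail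
      = (natCuts s ++ [s.length]).map (fun (i : Nat) => (i : Int)) := by simp
  rw [htail, List.zip_map, List.map_map]
  unfold chunksN
  refine List.map_congr_left (fun ab _ => ?_)
  show PySem.List.slice s (some ((ab.1 : Nat) : Int)) (some ((ab.2 : Nat) : Int)) = chunkOf s ab
  rw [PySem.List.slice_natCast]
  rfl

-- ===== VERDICT (by name: the statement is the Claim_ definition above) =====
theorem split_into_contiguous_runs_spec : Claim_equal_split_into_contiguous_runs := by
  intro indices _
  unfold Spec_split_into_contiguous_runs split_into_contiguous_runs split_into_contiguous_runs_alt
  by_cases hnil : indices = []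
  · simp [hnil, (PySem.List.sorted_eq_nil_iff ([] : List Int) (fun x => x) false).mpr rfl]
  · have hs := sorted_ne_nil indices hnil
    cases h : PySem.List.sorted indices (fun x => x) false with
    | nil => exact absurd h hs
    | cons a t =>
      simp only [hnil, ite_false, if_neg (List.cons_ne_nil a t)]
      have hA : t.foldl stepA [[a]] = ([] : List (List Int)) ++ fw [a] t :=
        foldlA_fw t [] [a] (by simp)
      rw [hA, List.nil_append, fw_chunksR t a, ← chunksN_chunksR t a, ← portB_chunksN (a :: t)]
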